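-- pv_equiv track=rewrite | github.com/thom-heinrich/twinr | .tmp_backend_fix/chonkydb/api/routers/external.py | _scope_ref_for_catalog_schema
-- ===== SOURCE A (Python) =====
-- from typing import Any, Callable, Dict, List, Optional
--
-- _TWINR_LONGTERM_SCOPE_DEFINITIONS: Dict[str, Dict[str, str]] = {
--     "objects": {
--         "snapshot_kind": "objects",
--         "uri_segment": "objects",
--         "catalog_schema": "twinr_memory_object_catalog_v3",
--         "legacy_catalog_schema": "twinr_memory_object_catalog_v2",
--         "segment_schema": "twinr_memory_object_catalog_segment_v1",
--     },
--     "conflicts": {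
--         "snapshot_kind": "conflicts",
--         "uri_segment": "conflicts",
--         "catalog_schema": "twinr_memory_conflict_catalog_v3",
--         "legacy_catalog_schema": "twinr_memory_conflict_catalog_v2",
--         "segment_schema": "twinr_memory_conflict_catalog_segment_v1",
--     },
--     "archive": {
--         "snapshot_kind": "archive",
--         "uri_segment": "archive",
--         "catalog_schema": "twinr_memory_archive_catalog_v3",
--         "legacy_catalog_schema": "twinr_memory_archive_catalog_v2",
--         "segment_schema": "twinr_memory_archive_catalog_segment_v1",
--     },
-- }
--
-- def _normalize_optional_text(value: Any) -> Optional[str]: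
--     normalized = str(value or "").strip()
--     return normalized or None
--
-- def _scope_ref_for_catalog_schema(schema: Any) -> Optional[str]:
--     normalized_schema = _normalize_optional_text(schema)
--     if normalized_schema is None:
--         return None
--     for snapshot_kind, definition in _TWINR_LONGTERM_SCOPE_DEFINITIONS.items():
--         if normalized_schema in {
--             definition["catalog_schema"],
--             definition["legacy_catalog_schema"],
--             definition["segment_schema"],
--         }:
--             return f"longterm:{snapshot_kind}:current"
--     return None
-- ===== SOURCE B (Python) =====
-- from typing import Any, Dict, Optional
--
-- _TWINR_LONGTERM_SCOPE_DEFINITIONS: Dict[str, Dict[str, str]] = {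
--     "objects": {
--         "snapshot_kind": "objects",
--         "uri_segment": "objects",
--         "catalog_schema": "twinr_memory_object_catalog_v3",
--         "legacy_catalog_schema": "twinr_memory_object_catalog_v2",
--         "segment_schema": "twinr_memory_object_catalog_segment_v1",
--     },
--     "conflicts": {
--         "snapshot_kind": "conflicts",
--         "uri_segment": "conflicts",
--         "catalog_schema": "twinr_memory_conflict_catalog_v3",
--         "legacy_catalog_schema": "twinr_memory_conflict_catalog_v2",
--         "segment_schema": "twinr_memory_conflict_catalog_segment_v1",
--     },
--     "archive": {
--         "snapshot_kind": "archive",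
--         "uri_segment": "archive",
--         "catalog_schema": "twinr_memory_archive_catalog_v3",
--         "legacy_catalog_schema": "twinr_memory_archive_catalog_v2",
--         "segment_schema": "twinr_memory_archive_catalog_segment_v1",
--     },
-- }
--
-- # Flat reverse index built once: schema string -> scope ref.
-- _SCHEMA_TO_SCOPE_REF: Dict[str, str] = {
--     definition[key]: f"longterm:{kind}:current"
--     for kind, definition in _TWINR_LONGTERM_SCOPE_DEFINITIONS.items()
--     for key in ("catalog_schema", "legacy_catalog_schema", "segment_schema")
-- }
--
-- def _scope_ref_for_catalog_schema(schema: Any) -> Optional[str]: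
--     normalized = str(schema or "").strip()
--     return _SCHEMA_TO_SCOPE_REF.get(normalized) if normalized else None
-- ===== Notes on version B (the rewrite author's own statement) =====
-- stated objective: simpler
-- what changed: Replaces the per-call loop over scope definitions with three set-membership tests each by a single lookup in a flat reverse dict precomputed once at module load.
import Mathlib
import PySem

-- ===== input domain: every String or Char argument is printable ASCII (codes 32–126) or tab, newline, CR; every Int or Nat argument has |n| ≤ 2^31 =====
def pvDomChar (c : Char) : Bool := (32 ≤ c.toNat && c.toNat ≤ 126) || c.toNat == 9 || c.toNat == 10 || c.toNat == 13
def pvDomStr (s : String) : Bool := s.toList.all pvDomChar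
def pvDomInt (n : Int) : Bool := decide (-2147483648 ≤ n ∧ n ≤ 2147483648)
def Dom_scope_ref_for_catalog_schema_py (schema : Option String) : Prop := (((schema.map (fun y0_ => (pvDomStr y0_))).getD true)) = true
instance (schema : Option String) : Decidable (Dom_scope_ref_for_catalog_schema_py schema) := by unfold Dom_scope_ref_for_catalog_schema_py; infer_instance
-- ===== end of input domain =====

-- B replaces A's per-call loop (with a set-membership test per definition) by a single
-- lookup in a flat reverse dict precomputed once; same return value everywhere.

-- ===== PORT A =====
-- _TWINR_LONGTERM_SCOPE_DEFINITIONS (shared constant data)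
def pvScopeDefs : List (String × PySem.Dict String String) :=
  [ ("objects", PySem.Dict.ofList
      [ ("snapshot_kind", "objects"), ("uri_segment", "objects"),
        ("catalog_schema", "twinr_memory_object_catalog_v3"),
        ("legacy_catalog_schema", "twinr_memory_object_catalog_v2"),
        ("segment_schema", "twinr_memory_object_catalog_segment_v1") ]),
    ("conflicts", PySem.Dict.ofList
      [ ("snapshot_kind", "conflicts"), ("uri_segment", "conflicts"),
        ("catalog_schema", "twinr_memory_conflict_catalog_v3"),
        ("legacy_catalog_schema", "twinr_memory_conflict_catalog_v2"),
        ("segment_schema", "twinr_memory_conflict_catalog_segment_v1") ]),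
    ("archive", PySem.Dict.ofList
      [ ("snapshot_kind", "archive"), ("uri_segment", "archive"),
        ("catalog_schema", "twinr_memory_archive_catalog_v3"),
        ("legacy_catalog_schema", "twinr_memory_archive_catalog_v2"),
        ("segment_schema", "twinr_memory_archive_catalog_segment_v1") ]) ]

-- _normalize_optional_text: str(value or "").strip() or None  (None and "" are both falsy → "")
def pvNormalizeOptionalText (value : Option String) : Option String :=
  let normalized := PySem.Str.strip (value.getD "")
  if normalized = "" then none else some normalized

-- the for-loop of A; definition[k] ported as getD (all three keys are present in every definition)
def pvScopeLoop (defs : List (String × PySem.Dict String String)) (n : String) : Option String :=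
  match defs with
  | [] => none
  | (kind, d) :: rest =>
      if PySem.Set.contains (PySem.Set.ofList
            [ d.getD "catalog_schema" "", d.getD "legacy_catalog_schema" "", d.getD "segment_schema" "" ]) n
      then some ("longterm:" ++ kind ++ ":current")
      else pvScopeLoop rest n

def scope_ref_for_catalog_schema_py (schema : Option String) : Option String :=
  match pvNormalizeOptionalText schema with
  | none => none
  | some normalized_schema => pvScopeLoop pvScopeDefs normalized_schema

-- ===== PORT B =====
-- _SCHEMA_TO_SCOPE_REF: flat reverse index built once from the definitions
def pvSchemaToScopeRef : PySem.Dict String String :=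
  PySem.Dict.ofList
    (pvScopeDefs.flatMap (fun kd =>
      ["catalog_schema", "legacy_catalog_schema", "segment_schema"].map
        (fun key => (kd.2.getD key "", "longterm:" ++ kd.1 ++ ":current"))))

def scope_ref_for_catalog_schema_py_alt (schema : Option String) : Option String :=
  let normalized := PySem.Str.strip (schema.getD "")
  if normalized = "" then none else PySem.Dict.get? pvSchemaToScopeRef normalized

-- ===== PRECONDITION & SPEC =====
def Spec_scope_ref_for_catalog_schema_py (schema : Option String) (out : Option String) : Prop := out = scope_ref_for_catalog_schema_py_alt schema
instance (schema : Option String) (out : Option String) : Decidable (Spec_scope_ref_for_catalog_schema_py schema out) := by unfold Spec_scope_ref_for_catalog_schema_py; infer_instance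

-- ===== CLAIM (what is proved, stated in full; the proofs are below) =====
def Claim_equal_scope_ref_for_catalog_schema_py : Prop := ∀ (schema : Option String), Dom_scope_ref_for_catalog_schema_py schema → Spec_scope_ref_for_catalog_schema_py schema (scope_ref_for_catalog_schema_py schema)

-- ===== LEMMAS AND PROOFS =====

-- the loop and the reverse-dict lookup agree on every normalized string
theorem pvLoopEqLookup (n : String) :
    pvScopeLoop pvScopeDefs n = PySem.Dict.get? pvSchemaToScopeRef n := by
  by_cases h1 : "twinr_memory_object_catalog_v3" = n <;>
  by_cases h2 : "twinr_memory_object_catalog_v2" = n <;>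
  by_cases h3 : "twinr_memory_object_catalog_segment_v1" = n <;>
  by_cases h4 : "twinr_memory_conflict_catalog_v3" = n <;>
  by_cases h5 : "twinr_memory_conflict_catalog_v2" = n <;>
  by_cases h6 : "twinr_memory_conflict_catalog_segment_v1" = n <;>
  by_cases h7 : "twinr_memory_archive_catalog_v3" = n <;>
  by_cases h8 : "twinr_memory_archive_catalog_v2" = n <;>
  by_cases h9 : "twinr_memory_archive_catalog_segment_v1" = n <;>
    first
    | (subst_vars; decide)
    | simp [pvScopeLoop, pvScopeDefs, pvSchemaToScopeRef, PySem.Set.contains,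
        PySem.Set.ofList, PySem.Set.add, PySem.Dict.ofList, PySem.Dict.get?,
        PySem.Dict.getD, PySem.Dict.update, PySem.Dict.empty, PySem.Dict.insert,
        Ne.symm h1, Ne.symm h2, Ne.symm h3, Ne.symm h4, Ne.symm h5, Ne.symm h6,
        Ne.symm h7, Ne.symm h8, Ne.symm h9] <;>
      exact ⟨h1, h2, h3, h4, h5, h6, h7, h8, h9⟩

-- ===== VERDICT (by name: the statement is the Claim_ definition above) =====
theorem scope_ref_for_catalog_schema_py_spec : Claim_equal_scope_ref_for_catalog_schema_py := by
  intro schema _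
  unfold Spec_scope_ref_for_catalog_schema_py scope_ref_for_catalog_schema_py
    scope_ref_for_catalog_schema_py_alt pvNormalizeOptionalText
  by_cases h : PySem.Str.strip (schema.getD "") = "" <;>
    simp [h, pvLoopEqLookup]
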